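-- pv_equiv track=rewrite | github.com/allenai/allenact | utils/misc_utils.py | uninterleave
-- ===== SOURCE A (Python) =====
-- from typing import Sequence, List, Optional
--
-- def uninterleave(input: Sequence, parts: int) -> List:
--     assert 0 < parts <= len(input)
--     n = len(input)
--
--     quotient = n // parts
--
--     return [
--         [
--             input[i + j * parts]
--             for j in range(quotient + 1)
--             if i + j * parts < len(input)
--         ]
--         for i in range(parts)
--     ]
-- ===== SOURCE B (Python) =====
-- def uninterleave(input, parts):
--     assert 0 < parts <= len(input)
--     result = [[] for _ in range(parts)]
--     for idx, val in enumerate(input):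
--         result[idx % parts].append(val)
--     return result
-- ===== Notes on version B (the rewrite author's own statement) =====
-- stated objective: simpler
-- what changed: A gathers each part with a nested strided comprehension (one pass over the index range per part, recomputing i + j*parts and a bounds test for every element); B makes a single sequential pass over enumerate(input), scattering each element into bucket idx % parts.
import Mathlib
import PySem

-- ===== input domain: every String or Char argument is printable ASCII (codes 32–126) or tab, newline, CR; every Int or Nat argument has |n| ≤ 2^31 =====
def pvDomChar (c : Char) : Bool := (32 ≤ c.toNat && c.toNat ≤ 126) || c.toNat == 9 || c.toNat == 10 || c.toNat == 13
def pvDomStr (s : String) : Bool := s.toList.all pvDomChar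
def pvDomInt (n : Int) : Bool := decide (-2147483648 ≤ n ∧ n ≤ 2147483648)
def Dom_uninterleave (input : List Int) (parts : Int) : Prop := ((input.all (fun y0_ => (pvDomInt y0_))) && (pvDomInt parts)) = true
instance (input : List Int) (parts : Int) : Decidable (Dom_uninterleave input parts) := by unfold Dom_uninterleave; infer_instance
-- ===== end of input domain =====

-- B replaces A's nested strided gather (one strided scan per part) by a single
-- sequential pass scattering each element into bucket idx % parts (objective: simpler).

-- ===== PORT A =====
def uninterleave (input : List Int) (parts : Int) : List (List Int) :=
  let n : Int := input.length
  let quotient := PySem.Int.floordiv n parts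
  (PySem.List.pyRange 0 parts 1).map (fun i =>
    ((PySem.List.pyRange 0 (quotient + 1) 1).filter (fun j => i + j * parts < n)).map
      (fun j => PySem.List.pyGetD input (i + j * parts) 0))

-- ===== PORT B =====
def uninterleave_alt (input : List Int) (parts : Int) : List (List Int) :=
  let init := (PySem.List.pyRange 0 parts 1).map (fun _ => ([] : List Int))
  (PySem.List.enumerate input 0).foldl
    (fun result iv =>
      PySem.List.pySetD result (PySem.Int.mod iv.1 parts)
        (PySem.List.pyGetD result (PySem.Int.mod iv.1 parts) [] ++ [iv.2]))
    init

-- ===== PRECONDITION & SPEC =====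
-- Pre_: exactly A's assert `0 < parts <= len(input)`; outside it both programs raise AssertionError.
def Pre_uninterleave (input : List Int) (parts : Int) : Prop :=
  0 < parts ∧ parts ≤ (input.length : Int)
instance (input : List Int) (parts : Int) : Decidable (Pre_uninterleave input parts) := by
  unfold Pre_uninterleave; infer_instance

def pvWitness_uninterleave : List Int × Int := ([3, 1, 4, 1, 5, 9, 2], 3)

def Spec_uninterleave (input : List Int) (parts : Int) (out : List (List Int)) : Prop := out = uninterleave_alt input parts
instance (input : List Int) (parts : Int) (out : List (List Int)) : Decidable (Spec_uninterleave input parts out) := by unfold Spec_uninterleave; infer_instance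

-- ===== CLAIM (what is proved, stated in full; the proofs are below) =====
def Claim_equal_uninterleave : Prop := ∀ (input : List Int) (parts : Int), Dom_uninterleave input parts → Pre_uninterleave input parts → Spec_uninterleave input parts (uninterleave input parts)

-- ===== LEMMAS AND PROOFS =====

-- count of j ≥ 0 with i + j*P < m (P > 0)
def pvCnt (m P i : Nat) : Nat := (m - i + P - 1) / P

-- the i-th output row, in Nat form
def pvRow (xs : List Int) (P i : Nat) : List Int :=
  (List.range (pvCnt xs.length P i)).map (fun j => xs.getD (i + j * P) 0)

def pvForm (xs : List Int) (P : Nat) : List (List Int) :=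
  (List.range P).map (fun i => pvRow xs P i)

theorem pvCnt_iff (m P i j : Nat) (hP : 0 < P) : j < pvCnt m P i ↔ i + j * P < m := by
  unfold pvCnt
  rw [Nat.lt_iff_add_one_le, Nat.le_div_iff_mul_le hP, Nat.add_mul, one_mul]
  omega

theorem pvCnt_eq (m P i c : Nat) (hP : 0 < P) (h : ∀ j, j < c ↔ i + j * P < m) :
    pvCnt m P i = c := by
  have A := pvCnt_iff m P i c hP
  have B := pvCnt_iff m P i (pvCnt m P i) hP
  have hc := h c
  have hcnt := h (pvCnt m P i)
  omega

theorem pvCnt_zero (P i : Nat) (hP : 0 < P) : pvCnt 0 P i = 0 := by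
  have := pvCnt_iff 0 P i 0 hP
  omega

theorem pv_filter_range (M c : Nat) (cond : Nat → Bool) (hM : c ≤ M)
    (h : ∀ j, cond j = true ↔ j < c) :
    (List.range M).filter cond = List.range c := by
  have : M = c + (M - c) := by omega
  rw [this, List.range_add]
  rw [List.filter_append]
  have h1 : (List.range c).filter cond = List.range c :=
    List.filter_eq_self.2 (by intro a ha; exact (h a).2 (List.mem_range.1 ha))
  have h2 : (((List.range (M - c)).map (fun j => c + j)).filter cond) = [] := by
    apply List.filter_eq_nil_iff.2
    intro a ha
    simp only [List.mem_map, List.mem_range] at ha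
    obtain ⟨b, _, rfl⟩ := ha
    simp only [Bool.not_eq_true]
    by_contra hcontra
    have := (h (c + b)).1 (by simpa using hcontra)
    omega
  rw [h1, h2, List.append_nil]

-- A's port equals the Nat normal form, for every 0 < parts.
theorem pvA_eq_form (xs : List Int) (parts : Int) (hp : 0 < parts) :
    uninterleave xs parts = pvForm xs parts.toNat := by
  unfold uninterleave pvForm
  obtain ⟨P, rfl⟩ : ∃ P : Nat, parts = (P : Int) := ⟨parts.toNat, (Int.toNat_of_nonneg (le_of_lt hp)).symm⟩
  have hP : 0 < P := by exact_mod_cast hp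
  simp only [Int.toNat_natCast]
  rw [PySem.List.pyRange_zero_natCast, List.map_map]
  apply List.map_congr_left
  intro i _
  simp only [Function.comp]
  unfold pvRow
  -- quotient + 1 as a Nat cast
  have hq : PySem.Int.floordiv (xs.length : Int) (P : Int) + 1 = ((xs.length / P + 1 : Nat) : Int) := by
    rw [PySem.Int.floordiv_natCast]; push_cast; ring
  rw [hq, PySem.List.pyRange_zero_natCast, List.filter_map, List.map_map]
  have hfil : (List.range (xs.length / P + 1)).filter
      ((fun j : Int => decide ((i : Int) + j * (P : Int) < (xs.length : Int))) ∘ (fun k : Nat => (k : Int)))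
      = List.range (pvCnt xs.length P i) := by
    apply pv_filter_range
    · -- pvCnt ≤ xs.length / P + 1
      by_contra hcon
      have h1 : xs.length / P + 1 < pvCnt xs.length P i := by omega
      have h2 := (pvCnt_iff xs.length P i (xs.length / P + 1) hP).1 h1
      have hdm := Nat.div_add_mod xs.length P
      have hml : xs.length % P < P := Nat.mod_lt _ hP
      have h4 : (xs.length / P + 1) * P = xs.length / P * P + P := by ring
      have h5 : P * (xs.length / P) = (xs.length / P) * P := Nat.mul_comm _ _
      omega
    · intro j
      simp only [Function.comp, decide_eq_true_eq]
      rw [pvCnt_iff xs.length P i j hP]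
      constructor
      · intro h; exact_mod_cast h
      · intro h; exact_mod_cast h
  rw [hfil]
  apply List.map_congr_left
  intro j hj
  simp only [Function.comp]
  have : (i : Int) + (j : Int) * (P : Int) = ((i + j * P : Nat) : Int) := by push_cast; ring
  rw [this, PySem.List.pyGetD_natCast]

-- the step lemma: appending one element updates exactly row (n % P)
theorem pvRow_snoc (ys : List Int) (x : Int) (P i : Nat) (hP : 0 < P) (hi : i < P) :
    pvRow (ys ++ [x]) P i =
      if i = ys.length % P then pvRow ys P i ++ [x] else pvRow ys P i := by
  have hlen : (ys ++ [x]).length = ys.length + 1 := by simp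
  set n := ys.length with hn
  by_cases hcase : i = n % P
  · -- row extended
    have hq := Nat.div_add_mod n P
    have hcnt_n : pvCnt n P i = n / P := by
      apply pvCnt_eq _ _ _ _ hP
      intro j
      constructor
      · intro hj
        have h1 : (j + 1) * P ≤ (n / P) * P := Nat.mul_le_mul_right _ (by omega)
        have h2 : (j + 1) * P = j * P + P := by ring
        have h3 : P * (n / P) = (n / P) * P := Nat.mul_comm _ _
        omega
      · intro hj
        by_contra hcon
        have hcon' : n / P ≤ j := by omega
        have h1 : (n / P) * P ≤ j * P := Nat.mul_le_mul_right _ hcon'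
        have h3 : P * (n / P) = (n / P) * P := Nat.mul_comm _ _
        omega
    have hcnt_n1 : pvCnt (n + 1) P i = n / P + 1 := by
      apply pvCnt_eq _ _ _ _ hP
      intro j
      constructor
      · intro hj
        have h1 : j * P ≤ (n / P) * P := Nat.mul_le_mul_right _ (by omega)
        have h3 : P * (n / P) = (n / P) * P := Nat.mul_comm _ _
        omega
      · intro hj
        by_contra hcon
        have hcon' : n / P + 1 ≤ j := by omega
        have h1 : (n / P + 1) * P ≤ j * P := Nat.mul_le_mul_right _ hcon'
        have h2 : (n / P + 1) * P = (n / P) * P + P := by ring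
        have h3 : P * (n / P) = (n / P) * P := Nat.mul_comm _ _
        omega
    rw [if_pos hcase]
    unfold pvRow
    rw [hlen, ← hn, hcnt_n1, hcnt_n, List.range_succ, List.map_append]
    congr 1
    · apply List.map_congr_left
      intro j hj
      have hjlt : j < n / P := by simpa using hj
      have hidx : i + j * P < n := (pvCnt_iff n P i j hP).1 (by rw [hcnt_n]; exact hjlt)
      simp only [List.getD_eq_getElem?_getD]
      rw [List.getElem?_append_left (by omega)]
    · have h3 : P * (n / P) = (n / P) * P := Nat.mul_comm _ _
      have hidx : i + (n / P) * P = n := by omega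
      simp only [List.map_cons, List.map_nil, List.getD_eq_getElem?_getD, hidx]
      rw [List.getElem?_append_right (by omega)]
      simp [hn]
  · -- row unchanged
    rw [if_neg hcase]
    have hne : ∀ j : Nat, i + j * P ≠ n := by
      intro j hEq
      apply hcase
      rw [← hEq, Nat.add_mul_mod_self_right, Nat.mod_eq_of_lt hi]
    have hcnt : pvCnt (n + 1) P i = pvCnt n P i := by
      apply pvCnt_eq _ _ _ _ hP
      intro j
      rw [pvCnt_iff n P i j hP]
      have := hne j
      omega
    unfold pvRow
    rw [hlen, ← hn, hcnt]
    apply List.map_congr_left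
    intro j hj
    have hjlt : j < pvCnt n P i := by simpa using hj
    have hidx : i + j * P < n := (pvCnt_iff n P i j hP).1 hjlt
    simp only [List.getD_eq_getElem?_getD]
    rw [List.getElem?_append_left (by omega)]

-- B's port equals the Nat normal form, for every 0 < parts.
theorem pvB_eq_form (xs : List Int) (parts : Int) (hp : 0 < parts) :
    uninterleave_alt xs parts = pvForm xs parts.toNat := by
  unfold uninterleave_alt
  obtain ⟨P, rfl⟩ : ∃ P : Nat, parts = (P : Int) := ⟨parts.toNat, (Int.toNat_of_nonneg (le_of_lt hp)).symm⟩
  have hP : 0 < P := by exact_mod_cast hp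
  simp only [Int.toNat_natCast]
  rw [PySem.List.pyRange_zero_natCast, List.map_map]
  -- snoc induction
  induction xs using List.reverseRecOn with
  | nil =>
    simp only [PySem.List.enumerate_nil, List.foldl_nil]
    unfold pvForm
    apply List.map_congr_left
    intro i _
    unfold pvRow
    simp [pvCnt_zero P i hP]
  | append_singleton ys x ih =>
    rw [PySem.List.enumerate_append, PySem.List.enumerate_cons, PySem.List.enumerate_nil,
        List.foldl_append, ih]
    simp only [List.foldl_cons, List.foldl_nil]
    have hmod : PySem.Int.mod ((0 : Int) + (ys.length : Int)) (P : Int)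
        = ((ys.length % P : Nat) : Int) := by
      rw [zero_add, PySem.Int.mod_natCast]
    rw [hmod, PySem.List.pySetD_natCast, PySem.List.pyGetD_natCast]
    set k := ys.length % P with hk
    have hkP : k < P := Nat.mod_lt _ hP
    have hgetD : (pvForm ys P).getD k [] = pvRow ys P k := by
      unfold pvForm
      rw [List.getD_eq_getElem?_getD, List.getElem?_map]
      simp [List.getElem?_range hkP]
    rw [hgetD]
    unfold pvForm
    apply List.ext_getElem
    · simp
    · intro m hm1 hm2
      have hmP : m < P := by simpa using hm2
      rw [List.getElem_set]
      simp only [List.getElem_map, List.getElem_range]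
      rw [pvRow_snoc ys x P m hP hmP]
      by_cases hmk : k = m
      · rw [if_pos hmk, if_pos (by omega)]
        rw [hmk]
      · rw [if_neg hmk, if_neg (by omega)]

-- ===== VERDICT (by name: the statement is the Claim_ definition above) =====
theorem uninterleave_spec : Claim_equal_uninterleave := by
  intro input parts _ hpre
  unfold Spec_uninterleave
  obtain ⟨hp, _⟩ := hpre
  rw [pvA_eq_form input parts hp, pvB_eq_form input parts hp]
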